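-- pv_equiv track=rewrite | github.com/mjhong231/Algorithm | 백준/Silver/2578. 빙고/빙고.py | find_bingo
-- ===== SOURCE A (Python) =====
-- def bingo(board):
--     bingo_count = 0
--
--     for row in board:
--         if row.count(0) == 5:
--             bingo_count += 1
--
--     for i in range(5):
--         cnt1 = 0
--         for j in range(5):
--             if board[j][i] == 0:
--                 cnt1 += 1
--         if cnt1 == 5:
--             bingo_count += 1
--
--
--     cnt2 = 0
--     for i in range(5):
--         if board[i][i] == 0:
--             cnt2 += 1
--     if cnt2 == 5:
--         bingo_count += 1
--
--
--     cnt3 = 0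
--     for i in range(5):
--         if board[i][4 - i] == 0:
--             cnt3 += 1
--     if cnt3 == 5:
--         bingo_count += 1
--
--     return bingo_count
--
-- def find_bingo(board, mc):
--     for i in range(25):
--         for j in range(5):
--             for k in range(5):
--                 if board[j][k] == mc[i]:
--                     board[j][k] = 0
--
--         if bingo(board) >= 3:
--             return i + 1
-- ===== SOURCE B (Python) =====
-- def find_bingo(board, mc):
--     # incremental row/column/diagonal zero-counters instead of recounting all 12 lines after every call
--     row_marks = [row.count(0) for row in board]
--     col_marks = [sum(board[j][k] == 0 for j in range(5)) for k in range(5)]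
--     diag_main = sum(board[i][i] == 0 for i in range(5))
--     diag_anti = sum(board[i][4 - i] == 0 for i in range(5))
--     for i in range(25):
--         v = mc[i]
--         if v != 0:
--             for j in range(5):
--                 for k in range(5):
--                     if board[j][k] == v:
--                         board[j][k] = 0
--                         row_marks[j] += 1
--                         col_marks[k] += 1
--                         if j == k:
--                             diag_main += 1
--                         if j + k == 4:
--                             diag_anti += 1
--         lines = sum(r == 5 for r in row_marks) + sum(c == 5 for c in col_marks) \
--                 + (diag_main == 5) + (diag_anti == 5)
--         if lines >= 3:
--             return i + 1
-- ===== Notes on version B (the rewrite author's own statement) =====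
-- stated objective: alternative
-- what changed: A re-scans the whole board and recounts all 12 bingo lines from scratch (bingo()) after every called number; B maintains incremental zero-counters for each row, column and diagonal, initialised once and bumped only when a cell actually transitions from nonzero to 0, so each call does a 12-entry counter check instead of a full-board recount.
import Mathlib
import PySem

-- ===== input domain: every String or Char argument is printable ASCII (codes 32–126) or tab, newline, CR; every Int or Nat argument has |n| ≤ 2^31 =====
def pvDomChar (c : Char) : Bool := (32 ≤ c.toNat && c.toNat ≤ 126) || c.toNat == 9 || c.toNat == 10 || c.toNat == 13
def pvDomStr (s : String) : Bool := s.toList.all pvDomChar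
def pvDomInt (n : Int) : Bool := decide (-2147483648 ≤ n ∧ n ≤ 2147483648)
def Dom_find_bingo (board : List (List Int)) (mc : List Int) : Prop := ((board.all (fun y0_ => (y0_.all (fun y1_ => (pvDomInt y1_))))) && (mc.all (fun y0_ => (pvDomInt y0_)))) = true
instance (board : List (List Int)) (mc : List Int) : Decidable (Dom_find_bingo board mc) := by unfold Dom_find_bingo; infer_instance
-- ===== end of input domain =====

-- B replaces A's full 12-line recount (bingo()) after every called number by incremental
-- row/column/diagonal zero-counters updated only when a cell actually transitions from
-- nonzero to 0 (objective: alternative — the input is a fixed-size 5x5 board with 25 calls,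
-- so no speed is claimed).  Both A and B mark the board in place in Python; the theorem is
-- about the return value (the final board contents come out the same as well).

-- ===== PORT A =====
-- board[j][k] (in range under Pre_; getD default never read there); shared cell accessor,
-- used by both ports for their board reads
def pvCell (b : List (List Int)) (j k : Nat) : Int := (b.getD j []).getD k 0
-- board[j][k] = 0
def pvASet0 (b : List (List Int)) (j k : Nat) : List (List Int) :=
  b.set j ((b.getD j []).set k 0)

-- the inner double loop of find_bingo marking every cell equal to v
def pvMarkA (b : List (List Int)) (v : Int) : List (List Int) :=
  (List.range 5).foldl (fun b j =>
    (List.range 5).foldl (fun b k =>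
      if pvCell b j k = v then pvASet0 b j k else b) b) b

-- bingo(board): count complete rows, columns and the two diagonals
def pvBingoA (b : List (List Int)) : Int :=
  let c1 : Int := b.foldl (fun acc row => if PySem.List.count row 0 = 5 then acc + 1 else acc) 0
  let c2 : Int := (List.range 5).foldl (fun acc i =>
      let cnt1 : Int := (List.range 5).foldl (fun c j => if pvCell b j i = 0 then c + 1 else c) 0
      if cnt1 = 5 then acc + 1 else acc) c1
  let cnt2 : Int := (List.range 5).foldl (fun c i => if pvCell b i i = 0 then c + 1 else c) 0
  let c3 : Int := if cnt2 = 5 then c2 + 1 else c2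
  let cnt3 : Int := (List.range 5).foldl (fun c i => if pvCell b i (4 - i) = 0 then c + 1 else c) 0
  if cnt3 = 5 then c3 + 1 else c3

def find_bingo (board : List (List Int)) (mc : List Int) : Option Int :=
  ((List.range 25).foldl (fun st i =>
      match st.2 with
      | some _ => st          -- already returned
      | none =>
        let b := pvMarkA st.1 (mc.getD i 0)
        if pvBingoA b ≥ 3 then (b, some ((i : Int) + 1)) else (b, none))
    (board, (none : Option Int))).2

-- ===== PORT B =====
-- the running state of B: the board plus incremental zero-counters per line
structure BSt where
  b : List (List Int)
  rm : List Int
  cm : List Int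
  dm : Int
  da : Int
deriving Repr, DecidableEq

-- sum(board[j][k] == 0 for j in range(5))
def pvColSum (b : List (List Int)) (k : Nat) : Int :=
  (List.range 5).foldl (fun a j => a + (if pvCell b j k = 0 then 1 else 0)) 0
-- sum(board[i][i] == 0 for i in range(5))
def pvDiagM (b : List (List Int)) : Int :=
  (List.range 5).foldl (fun a i => a + (if pvCell b i i = 0 then 1 else 0)) 0
-- sum(board[i][4-i] == 0 for i in range(5))
def pvDiagA (b : List (List Int)) : Int :=
  (List.range 5).foldl (fun a i => a + (if pvCell b i (4 - i) = 0 then 1 else 0)) 0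

-- one nonzero cell transitions to 0: mark it and bump its four possible line counters
def pvTouch (s : BSt) (j k : Nat) : BSt :=
  { b  := s.b.set j ((s.b.getD j []).set k 0)
    rm := s.rm.set j (s.rm.getD j 0 + 1)
    cm := s.cm.set k (s.cm.getD k 0 + 1)
    dm := if j = k then s.dm + 1 else s.dm
    da := if j + k = 4 then s.da + 1 else s.da }

def pvMarkB (s : BSt) (v : Int) : BSt :=
  (List.range 5).foldl (fun s j =>
    (List.range 5).foldl (fun s k =>
      if pvCell s.b j k = v then pvTouch s j k else s) s) s

-- lines = sum(r==5 …) + sum(c==5 …) + (dm==5) + (da==5)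
def pvLines (s : BSt) : Int :=
  s.rm.foldl (fun a r => a + (if r = 5 then 1 else 0)) 0
  + s.cm.foldl (fun a c => a + (if c = 5 then 1 else 0)) 0
  + (if s.dm = 5 then 1 else 0) + (if s.da = 5 then 1 else 0)

def find_bingo_alt (board : List (List Int)) (mc : List Int) : Option Int :=
  let s0 : BSt :=
    { b  := board
      rm := board.map (fun row => (PySem.List.count row 0 : Int))
      cm := (List.range 5).map (fun k => pvColSum board k)
      dm := pvDiagM board
      da := pvDiagA board }
  ((List.range 25).foldl (fun st i =>
      match st.2 with
      | some _ => st
      | none =>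
        let v := mc.getD i 0
        let s := if v ≠ 0 then pvMarkB st.1 v else st.1
        if pvLines s ≥ 3 then (s, some ((i : Int) + 1)) else (s, none))
    (s0, (none : Option Int))).2

-- ===== PRECONDITION & SPEC =====
-- Pre_ excludes the boards on which A's cell indexing always raises IndexError: fewer than
-- 5 rows, or one of the first five rows shorter than 5 cells (bingo() and the marking loop
-- read board[j][k] for all j,k < 5).  A additionally raises IndexError at mc[i] when mc has
-- fewer than 25 entries and no third bingo line arrives before it runs out; whether that
-- happens depends on the run, not on any shape of the input, so it cannot be excluded in
-- closed form: both ports read the called numbers with getD (reads past the end never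
-- influence a result that Python actually returns), and on every input where A returns a
-- value the ports compute exactly the Pythons' values.
def Pre_find_bingo (board : List (List Int)) (mc : List Int) : Prop :=
  5 ≤ board.length ∧ ∀ j < 5, 5 ≤ (board.getD j []).length

instance (board : List (List Int)) (mc : List Int) : Decidable (Pre_find_bingo board mc) := by
  unfold Pre_find_bingo; infer_instance

def pvWitness_find_bingo : List (List Int) × List Int :=
  ([[1, 2, 3, 4, 5], [6, 7, 8, 9, 10], [11, 12, 13, 14, 15],
    [16, 17, 18, 19, 20], [21, 22, 23, 24, 25]],
   [1, 2, 3, 4, 5, 6, 7, 8, 9, 10, 11, 12, 13, 14, 15, 16, 17, 18, 19, 20, 21, 22, 23, 24, 25])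

def Spec_find_bingo (board : List (List Int)) (mc : List Int) (out : Option Int) : Prop := out = find_bingo_alt board mc
instance (board : List (List Int)) (mc : List Int) (out : Option Int) : Decidable (Spec_find_bingo board mc out) := by unfold Spec_find_bingo; infer_instance

-- ===== CLAIM (what is proved, stated in full; the proofs are below) =====
def Claim_equal_find_bingo : Prop := ∀ (board : List (List Int)) (mc : List Int), Dom_find_bingo board mc → Pre_find_bingo board mc → Spec_find_bingo board mc (find_bingo board mc)

-- ===== LEMMAS AND PROOFS =====

-- the board shape Pre_ guarantees, preserved by marking
def pvSh (b : List (List Int)) : Prop :=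
  5 ≤ b.length ∧ ∀ j < 5, 5 ≤ (b.getD j []).length

-- the counters B maintains, as a function of the current board
def pvAbs (b : List (List Int)) : BSt :=
  { b  := b
    rm := b.map (fun row => (PySem.List.count row 0 : Int))
    cm := (List.range 5).map (fun k => pvColSum b k)
    dm := pvDiagM b
    da := pvDiagA b }

-- indicator folds are countP
theorem pv_fold_add {α : Type} (p : α → Prop) [DecidablePred p] (l : List α) (c : Int) :
    l.foldl (fun a x => a + (if p x then 1 else 0)) c = c + (l.countP (fun x => decide (p x)) : Int) := by
  induction l generalizing c with
  | nil => simp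
  | cons x t ih => by_cases h : p x <;> simp [h, ih] <;> push_cast <;> ring

-- getD through set / map
theorem pv_getD_set (b : List (List Int)) (j j' : Nat) (r : List Int) (hj : j < b.length) :
    (b.set j r).getD j' [] = if j' = j then r else b.getD j' [] := by
  simp only [List.getD_eq_getElem?_getD, List.getElem?_set]
  by_cases h : j = j'
  · subst h; simp [hj]
  · rw [if_neg h, if_neg (fun hh => h hh.symm)]

theorem pv_getD_set_int (l : List Int) (k k' : Nat) (x : Int) (hk : k < l.length) :
    (l.set k x).getD k' 0 = if k' = k then x else l.getD k' 0 := by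
  simp only [List.getD_eq_getElem?_getD, List.getElem?_set]
  by_cases h : k = k'
  · subst h; simp [hk]
  · rw [if_neg h, if_neg (fun hh => h hh.symm)]

theorem pv_getD_map (b : List (List Int)) (f : List Int → Int) (j : Nat) (hj : j < b.length) :
    (b.map f).getD j 0 = f (b.getD j []) := by
  simp only [List.getD_eq_getElem?_getD, List.getElem?_map]
  rw [List.getElem?_eq_getElem hj]
  simp

theorem pv_getD_map_range (f : Nat → Int) (k : Nat) (hk : k < 5) :
    ((List.range 5).map f).getD k 0 = f k := by
  interval_cases k <;> rfl

-- setting a zero cell to 0 is the identity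
theorem pv_set_getD_self (l : List Int) (k : Nat) (hk : k < l.length) :
    l.set k (l.getD k 0) = l := by
  induction l generalizing k with
  | nil => simp at hk
  | cons x t ih =>
    cases k with
    | zero => simp
    | succ n => simp only [List.set_cons_succ, List.getD_cons_succ]; rw [ih]; simpa using hk

theorem pv_set_getD_self' (b : List (List Int)) (j : Nat) (hj : j < b.length) :
    b.set j (b.getD j []) = b := by
  induction b generalizing j with
  | nil => simp at hj
  | cons x t ih =>
    cases j with
    | zero => simp
    | succ n => simp only [List.set_cons_succ, List.getD_cons_succ]; rw [ih]; simpa using hj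

-- counting zeros after one nonzero cell is zeroed
theorem pv_count_set (r : List Int) (k : Nat) (hk : k < r.length) (h : r.getD k 0 ≠ 0) :
    ((r.set k 0).count 0 : Int) = (r.count 0 : Int) + 1 := by
  induction r generalizing k with
  | nil => simp at hk
  | cons x t ih =>
    cases k with
    | zero =>
      simp only [List.getD_cons_zero] at h
      simp [h]
    | succ n =>
      simp only [List.getD_cons_succ] at h
      have := ih n (by simpa using hk) h
      simp [List.count_cons]
      split <;> push_cast at this ⊢ <;> omega

-- cell lookup after a single-cell write
theorem pv_cell_set (b : List (List Int)) (j k j' k' : Nat)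
    (hj : j < b.length) (hk : k < (b.getD j []).length) :
    pvCell (pvASet0 b j k) j' k' =
      if j' = j ∧ k' = k then 0 else pvCell b j' k' := by
  unfold pvCell pvASet0
  rw [pv_getD_set b j j' _ hj]
  by_cases h : j' = j
  · subst h
    rw [if_pos rfl, pv_getD_set_int _ _ _ _ hk]
    by_cases h2 : k' = k <;> simp [h2]
  · simp [h]

theorem pv_sh_set (b : List (List Int)) (j k : Nat) (hj : j < 5) (hs : pvSh b) :
    pvSh (pvASet0 b j k) := by
  obtain ⟨h1, h2⟩ := hs
  refine ⟨by simpa [pvASet0] using h1, fun j' hj' => ?_⟩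
  unfold pvASet0
  rw [pv_getD_set b j j' _ (by omega)]
  split
  · rename_i h; subst h; simpa using h2 j' hj'
  · exact h2 j' hj'

-- a countP after flipping exactly one position of a duplicate-free list
theorem pv_countP_update (l : List Nat) (p q : Nat → Bool) (t : Nat)
    (h1 : l.count t = 1) (hpt : p t = false) (hqt : q t = true)
    (hagree : ∀ x ∈ l, x ≠ t → p x = q x) : l.countP q = l.countP p + 1 := by
  induction l with
  | nil => simp at h1
  | cons x s ih =>
    by_cases hx : x = t
    · subst hx
      have hs : s.count x = 0 := by simpa [List.count_cons] using h1
      have heq : s.countP q = s.countP p := by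
        apply List.countP_congr
        intro a ha
        rw [hagree a (List.mem_cons_of_mem _ ha) (fun hh => by
          rw [hh] at ha; rw [List.count_eq_zero] at hs; exact hs ha)]
      simp [hpt, hqt, heq]
    · have h1' : s.count t = 1 := by simpa [List.count_cons, hx] using h1
      have := ih h1' (fun a ha hne => hagree a (List.mem_cons_of_mem _ ha) hne)
      have hx' := hagree x (List.mem_cons_self) hx
      simp only [List.countP_cons, this, ← hx']
      split <;> omega

-- the column sums after one marking write
theorem pv_colsum_set (b : List (List Int)) (j k k' : Nat)
    (hj : j < 5) (hb : j < b.length) (hk : k < (b.getD j []).length) (h0 : pvCell b j k ≠ 0) :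
    pvColSum (pvASet0 b j k) k' = pvColSum b k' + (if k' = k then 1 else 0) := by
  have hcell := fun j' k'' => pv_cell_set b j k j' k'' hb hk
  unfold pvColSum
  rw [pv_fold_add, pv_fold_add]
  by_cases hkk : k' = k
  · subst hkk
    rw [if_pos rfl]
    rw [pv_countP_update (List.range 5)
      (fun j' => decide (pvCell b j' k' = 0))
      (fun j' => decide (pvCell (pvASet0 b j k') j' k' = 0)) j
      (List.count_eq_one_of_mem (List.nodup_range) (by simp [hj]))
      (by simpa [pvCell] using h0)
      (by have := hcell j k'; simp [pvCell] at this ⊢; simp [this])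
      (fun x hx hne => by
        have := hcell x k'
        rw [if_neg (by tauto)] at this
        simp [pvCell] at this ⊢
        rw [this])]
    push_cast; ring
  · rw [if_neg hkk]
    have heq : ((List.range 5).countP (fun j' => decide (pvCell (pvASet0 b j k) j' k' = 0)))
         = ((List.range 5).countP (fun j' => decide (pvCell b j' k' = 0))) := by
      apply List.countP_congr
      intro a ha
      have := hcell a k'
      rw [if_neg (by tauto)] at this
      simp [pvCell] at this ⊢
      rw [this]
    rw [heq]; ring

-- the main diagonal sum after one marking write
theorem pv_diagM_set (b : List (List Int)) (j k : Nat)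
    (hj : j < 5) (hb : j < b.length) (hk : k < (b.getD j []).length) (h0 : pvCell b j k ≠ 0) :
    pvDiagM (pvASet0 b j k) = pvDiagM b + (if j = k then 1 else 0) := by
  have hcell := fun j' k'' => pv_cell_set b j k j' k'' hb hk
  unfold pvDiagM
  rw [pv_fold_add, pv_fold_add]
  by_cases hjk : j = k
  · subst hjk
    rw [if_pos rfl]
    rw [pv_countP_update (List.range 5)
      (fun i => decide (pvCell b i i = 0))
      (fun i => decide (pvCell (pvASet0 b j j) i i = 0)) j
      (List.count_eq_one_of_mem (List.nodup_range) (by simp [hj]))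
      (by simpa [pvCell] using h0)
      (by have := hcell j j; simp [pvCell] at this ⊢; simp [this])
      (fun x hx hne => by
        have := hcell x x
        rw [if_neg (by tauto)] at this
        simp [pvCell] at this ⊢
        rw [this])]
    push_cast; ring
  · rw [if_neg hjk]
    have heq : ((List.range 5).countP (fun i => decide (pvCell (pvASet0 b j k) i i = 0)))
         = ((List.range 5).countP (fun i => decide (pvCell b i i = 0))) := by
      apply List.countP_congr
      intro a ha
      have := hcell a a
      rw [if_neg (by rintro ⟨rfl, rfl⟩; exact hjk rfl)] at this
      simp [pvCell] at this ⊢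
      rw [this]
    rw [heq]; ring

-- the anti-diagonal sum after one marking write
theorem pv_diagA_set (b : List (List Int)) (j k : Nat)
    (hj : j < 5) (hkk : k < 5) (hb : j < b.length) (hk : k < (b.getD j []).length) (h0 : pvCell b j k ≠ 0) :
    pvDiagA (pvASet0 b j k) = pvDiagA b + (if j + k = 4 then 1 else 0) := by
  have hcell := fun j' k'' => pv_cell_set b j k j' k'' hb hk
  unfold pvDiagA
  rw [pv_fold_add, pv_fold_add]
  by_cases hjk : j + k = 4
  · rw [if_pos hjk]
    rw [pv_countP_update (List.range 5)
      (fun i => decide (pvCell b i (4 - i) = 0))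
      (fun i => decide (pvCell (pvASet0 b j k) i (4 - i) = 0)) j
      (List.count_eq_one_of_mem (List.nodup_range) (by simp [hj]))
      (by have h4 : 4 - j = k := by omega
          simp only [h4]; simpa [pvCell] using h0)
      (by have h4 : 4 - j = k := by omega
          have := hcell j k
          simp only [h4]
          simp [pvCell] at this ⊢; simp [this])
      (fun x hx hne => by
        have := hcell x (4 - x)
        rw [if_neg (by rintro ⟨rfl, -⟩; exact hne rfl)] at this
        simp [pvCell] at this ⊢
        rw [this])]
    push_cast; ring
  · rw [if_neg hjk]
    have heq : ((List.range 5).countP (fun i => decide (pvCell (pvASet0 b j k) i (4 - i) = 0)))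
         = ((List.range 5).countP (fun i => decide (pvCell b i (4 - i) = 0))) := by
      apply List.countP_congr
      intro a ha
      have := hcell a (4 - a)
      rw [if_neg (by rintro ⟨rfl, h4⟩; simp at ha; omega)] at this
      simp [pvCell] at this ⊢
      rw [this]
    rw [heq]; ring

-- one marking step keeps the counters in sync
theorem pv_touch_abs (b : List (List Int)) (j k : Nat) (hs : pvSh b)
    (hj : j < 5) (hk : k < 5) (h0 : pvCell b j k ≠ 0) :
    pvTouch (pvAbs b) j k = pvAbs (pvASet0 b j k) := by
  have hb : j < b.length := by have := hs.1; omega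
  have hrl : k < (b.getD j []).length := by have := hs.2 j hj; omega
  unfold pvTouch pvAbs
  simp only [BSt.mk.injEq]
  refine ⟨rfl, ?_, ?_, ?_, ?_⟩
  · -- row counters
    unfold pvASet0
    rw [List.map_set, pv_getD_map b _ j hb, PySem.List.count_eq, PySem.List.count_eq,
        pv_count_set _ k hrl (by simpa [pvCell] using h0)]
  · -- column counters
    apply List.ext_getElem (by simp)
    intro i hi1 hi2
    simp only [List.length_set, List.length_map, List.length_range] at hi1
    rw [List.getElem_set, List.getElem_map, List.getElem_range]
    rw [List.getElem_map, List.getElem_range]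
    rw [pv_colsum_set b j k i hj hb hrl h0]
    rw [pv_getD_map_range _ k hk]
    by_cases hik : k = i
    · subst hik; simp
    · rw [if_neg hik, if_neg (fun hh => hik hh.symm)]; ring
  · exact (pv_diagM_set b j k hj hb hrl h0).symm ▸ (by split <;> ring)
  · exact (pv_diagA_set b j k hj hk hb hrl h0).symm ▸ (by split <;> ring)

-- the two marking loops stay in sync (v ≠ 0): inner loop over column indices
theorem pv_mark_inner (ks : List Nat) (b : List (List Int)) (j : Nat) (v : Int)
    (hks : ∀ k ∈ ks, k < 5) (hj : j < 5) (hs : pvSh b) (hv : v ≠ 0) :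
    ks.foldl (fun s k => if pvCell s.b j k = v then pvTouch s j k else s) (pvAbs b)
      = pvAbs (ks.foldl (fun b k => if pvCell b j k = v then pvASet0 b j k else b) b)
    ∧ pvSh (ks.foldl (fun b k => if pvCell b j k = v then pvASet0 b j k else b) b) := by
  induction ks generalizing b with
  | nil => exact ⟨rfl, hs⟩
  | cons k ks ih =>
    have hk : k < 5 := hks k (List.mem_cons_self)
    have hcond : pvCell (pvAbs b).b j k = pvCell b j k := rfl
    simp only [List.foldl_cons, hcond]
    by_cases hc : pvCell b j k = v
    · rw [if_pos hc, if_pos hc, pv_touch_abs b j k hs hj hk (hc ▸ hv)]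
      exact ih _ (fun x hx => hks x (List.mem_cons_of_mem _ hx)) (pv_sh_set b j k hj hs)
    · rw [if_neg hc, if_neg hc]
      exact ih _ (fun x hx => hks x (List.mem_cons_of_mem _ hx)) hs

theorem pv_mark_sync (b : List (List Int)) (v : Int) (hs : pvSh b) (hv : v ≠ 0) :
    pvMarkB (pvAbs b) v = pvAbs (pvMarkA b v) ∧ pvSh (pvMarkA b v) := by
  unfold pvMarkB pvMarkA
  have main : ∀ (js : List Nat) (b : List (List Int)), (∀ j ∈ js, j < 5) → pvSh b →
      js.foldl (fun s j => (List.range 5).foldl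
          (fun s k => if pvCell s.b j k = v then pvTouch s j k else s) s) (pvAbs b)
        = pvAbs (js.foldl (fun b j => (List.range 5).foldl
          (fun b k => if pvCell b j k = v then pvASet0 b j k else b) b) b)
      ∧ pvSh (js.foldl (fun b j => (List.range 5).foldl
          (fun b k => if pvCell b j k = v then pvASet0 b j k else b) b) b) := by
    intro js
    induction js with
    | nil => exact fun b _ hs => ⟨rfl, hs⟩
    | cons j js ih =>
      intro b hjs hs
      have hj : j < 5 := hjs j (List.mem_cons_self)
      have step := pv_mark_inner (List.range 5) b j v (by simp) hj hs hv
      simp only [List.foldl_cons, step.1]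
      exact ih _ (fun x hx => hjs x (List.mem_cons_of_mem _ hx)) step.2
  exact main (List.range 5) b (by simp) hs

-- marking 0 changes nothing (every cell equal to 0 is rewritten to its own value)
theorem pv_mark_zero (b : List (List Int)) (hs : pvSh b) : pvMarkA b 0 = b := by
  unfold pvMarkA
  have inner : ∀ (ks : List Nat) (j : Nat), j < 5 →
      ks.foldl (fun b' k => if pvCell b' j k = 0 then pvASet0 b' j k else b') b = b := by
    intro ks j hj
    induction ks with
    | nil => rfl
    | cons k ks ih =>
      simp only [List.foldl_cons]
      by_cases hc : pvCell b j k = 0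
      · have hset : pvASet0 b j k = b := by
          unfold pvASet0
          have hbl : j < b.length := by have := hs.1; omega
          by_cases hkl : k < (b.getD j []).length
          · have : (b.getD j []).set k 0 = b.getD j [] := by
              have := pv_set_getD_self (b.getD j []) k hkl
              rwa [(by simpa [pvCell] using hc : (b.getD j []).getD k 0 = 0)] at this
            rw [this, pv_set_getD_self' b j hbl]
          · rw [List.set_eq_of_length_le (show (b.getD j []).length ≤ k by omega), pv_set_getD_self' b j hbl]
        rw [if_pos hc, hset, ih]
      · rw [if_neg hc, ih]
  have outer : ∀ (js : List Nat), (∀ j ∈ js, j < 5) →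
      js.foldl (fun b' j => (List.range 5).foldl
        (fun b'' k => if pvCell b'' j k = 0 then pvASet0 b'' j k else b'') b') b = b := by
    intro js hjs
    induction js with
    | nil => rfl
    | cons j js ih =>
      simp only [List.foldl_cons]
      rw [inner (List.range 5) j (hjs j List.mem_cons_self)]
      exact ih (fun x hx => hjs x (List.mem_cons_of_mem _ hx))
  exact outer (List.range 5) (by simp)

-- bridging: each of A's hand counts equals B's counter expression
theorem pv_cnt1_eq (b : List (List Int)) (i : Nat) :
    (List.range 5).foldl (fun c j => if pvCell b j i = 0 then c + 1 else c) (0 : Int) = pvColSum b i := by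
  simp only [pvColSum, pvCell, show List.range 5 = [0, 1, 2, 3, 4] from rfl,
    List.foldl_cons, List.foldl_nil]
  split_ifs <;> omega

theorem pv_cnt2_eq (b : List (List Int)) :
    (List.range 5).foldl (fun c i => if pvCell b i i = 0 then c + 1 else c) (0 : Int) = pvDiagM b := by
  simp only [pvDiagM, pvCell, show List.range 5 = [0, 1, 2, 3, 4] from rfl,
    List.foldl_cons, List.foldl_nil]
  split_ifs <;> omega

theorem pv_cnt3_eq (b : List (List Int)) :
    (List.range 5).foldl (fun c i => if pvCell b i (4 - i) = 0 then c + 1 else c) (0 : Int) = pvDiagA b := by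
  simp only [pvDiagA, pvCell, show List.range 5 = [0, 1, 2, 3, 4] from rfl,
    List.foldl_cons, List.foldl_nil]
  split_ifs <;> omega

theorem pv_rowfold_eq (l : List (List Int)) (c : Int) :
    l.foldl (fun acc row => if PySem.List.count row 0 = 5 then acc + 1 else acc) c
      = (l.map (fun row => (PySem.List.count row 0 : Int))).foldl
          (fun a r => a + (if r = 5 then 1 else 0)) c := by
  induction l generalizing c with
  | nil => rfl
  | cons r t ih =>
    simp only [List.map_cons, List.foldl_cons]
    rw [← ih]
    have : (if PySem.List.count r 0 = 5 then c + 1 else c)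
        = c + (if ((PySem.List.count r 0 : Nat) : Int) = 5 then 1 else 0) := by
      split_ifs <;> omega
    rw [this]

-- the full recount of bingo() equals the incremental-counter check
set_option maxHeartbeats 1000000 in
theorem pv_lines_eq (b : List (List Int)) (hs : pvSh b) :
    pvBingoA b = pvLines (pvAbs b) := by
  simp only [pvBingoA, pvLines, pvAbs]
  rw [pv_rowfold_eq, List.foldl_map]
  simp only [pv_cnt1_eq, pv_cnt2_eq, pv_cnt3_eq]
  simp only [show List.range 5 = [0, 1, 2, 3, 4] from rfl, List.map_cons, List.map_nil,
    List.foldl_cons, List.foldl_nil]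
  split_ifs <;> omega

-- proof-only copies of the two loop bodies (definitionally the ports' lambdas)
def pvStepA (mc : List Int) (st : List (List Int) × Option Int) (i : Nat) :
    List (List Int) × Option Int :=
  match st.2 with
  | some _ => st
  | none =>
    let b := pvMarkA st.1 (mc.getD i 0)
    if pvBingoA b ≥ 3 then (b, some ((i : Int) + 1)) else (b, none)

def pvStepB (mc : List Int) (st : BSt × Option Int) (i : Nat) : BSt × Option Int :=
  match st.2 with
  | some _ => st
  | none =>
    let v := mc.getD i 0
    let s := if v ≠ 0 then pvMarkB st.1 v else st.1
    if pvLines s ≥ 3 then (s, some ((i : Int) + 1)) else (s, none)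

-- the two main loops stay in sync
theorem pv_main_sync (mc : List Int) (is : List Nat) :
    ∀ (b : List (List Int)) (r : Option Int), pvSh b →
    List.foldl (pvStepB mc) (pvAbs b, r) is
      = (pvAbs (List.foldl (pvStepA mc) (b, r) is).1, (List.foldl (pvStepA mc) (b, r) is).2)
    ∧ pvSh (List.foldl (pvStepA mc) (b, r) is).1 := by
  induction is with
  | nil => exact fun b r hs => ⟨rfl, hs⟩
  | cons i t ih =>
    intro b r hs
    cases r with
    | some x =>
      have hA : pvStepA mc (b, some x) i = (b, some x) := rfl
      have hB : pvStepB mc (pvAbs b, some x) i = (pvAbs b, some x) := rfl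
      simp only [List.foldl_cons, hA, hB]
      exact ih b (some x) hs
    | none =>
      simp only [List.foldl_cons]
      by_cases hv : mc.getD i 0 = 0
      · have hmark : pvMarkA b (mc.getD i 0) = b := by rw [hv]; exact pv_mark_zero b hs
        have hA : pvStepA mc (b, none) i
            = (if pvBingoA b ≥ 3 then (b, some ((i : Int) + 1)) else (b, none)) := by
          show (if pvBingoA (pvMarkA b (mc.getD i 0)) ≥ 3
              then (pvMarkA b (mc.getD i 0), some ((i : Int) + 1))
              else (pvMarkA b (mc.getD i 0), none)) = _
          rw [hmark]
        have hB : pvStepB mc (pvAbs b, none) i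
            = (if pvLines (pvAbs b) ≥ 3 then (pvAbs b, some ((i : Int) + 1)) else (pvAbs b, none)) := by
          show (if pvLines (if mc.getD i 0 ≠ 0 then pvMarkB (pvAbs b) (mc.getD i 0) else pvAbs b) ≥ 3
              then ((if mc.getD i 0 ≠ 0 then pvMarkB (pvAbs b) (mc.getD i 0) else pvAbs b), some ((i : Int) + 1))
              else ((if mc.getD i 0 ≠ 0 then pvMarkB (pvAbs b) (mc.getD i 0) else pvAbs b), none)) = _
          simp only [hv, ne_eq, not_true_eq_false, if_false]
        rw [hA, hB, ← pv_lines_eq b hs]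
        by_cases hbo : pvBingoA b ≥ 3
        · simp only [if_pos hbo]
          exact ih b (some ((i : Int) + 1)) hs
        · simp only [if_neg hbo]
          exact ih b none hs
      · obtain ⟨hsync, hsh⟩ := pv_mark_sync b (mc.getD i 0) hs hv
        have hA : pvStepA mc (b, none) i
            = (if pvBingoA (pvMarkA b (mc.getD i 0)) ≥ 3
              then (pvMarkA b (mc.getD i 0), some ((i : Int) + 1))
              else (pvMarkA b (mc.getD i 0), none)) := rfl
        have hB : pvStepB mc (pvAbs b, none) i
            = (if pvLines (pvAbs (pvMarkA b (mc.getD i 0))) ≥ 3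
              then (pvAbs (pvMarkA b (mc.getD i 0)), some ((i : Int) + 1))
              else (pvAbs (pvMarkA b (mc.getD i 0)), none)) := by
          show (if pvLines (if mc.getD i 0 ≠ 0 then pvMarkB (pvAbs b) (mc.getD i 0) else pvAbs b) ≥ 3
              then ((if mc.getD i 0 ≠ 0 then pvMarkB (pvAbs b) (mc.getD i 0) else pvAbs b), some ((i : Int) + 1))
              else ((if mc.getD i 0 ≠ 0 then pvMarkB (pvAbs b) (mc.getD i 0) else pvAbs b), none)) = _
          simp only [hv, ne_eq, not_false_eq_true, if_true, hsync]
        rw [hA, hB, ← pv_lines_eq _ hsh]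
        by_cases hbo : pvBingoA (pvMarkA b (mc.getD i 0)) ≥ 3
        · simp only [if_pos hbo]
          exact ih _ (some ((i : Int) + 1)) hsh
        · simp only [if_neg hbo]
          exact ih _ none hsh

-- ===== VERDICT (by name: the statement is the Claim_ definition above) =====
theorem find_bingo_spec : Claim_equal_find_bingo := by
  intro board mc hdom hpre
  have hs : pvSh board := ⟨hpre.1, hpre.2⟩
  show find_bingo board mc = find_bingo_alt board mc
  have ha : find_bingo board mc = (List.foldl (pvStepA mc) (board, none) (List.range 25)).2 := rfl
  have hb : find_bingo_alt board mc
      = (List.foldl (pvStepB mc) (pvAbs board, none) (List.range 25)).2 := rfl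
  rw [ha, hb, (pv_main_sync mc (List.range 25) board none hs).1]
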